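-- pv_equiv track=rewrite | github.com/ICRAR/boinc-magphys | server/src/hdf5_to_fits/hdf5_to_fits_batch.py | check_args
-- ===== SOURCE A (Python) =====
-- def check_args(args):
--     """
--     Checks the command line arguments to ensure there's at least one feature, layer and pixel type.
--     :param args: The parsed command line args
--     :return: True if the args are fine, False if not.
--     """
--
--     has_feature = False
--     has_layer = False
--     has_pixel = False
--
--     for k in args:
--         if k.startswith('-f'):
--             has_layer = True
--
--         if k.startswith('-l'):
--             has_feature = True
--
--         if k.startswith('-t'):
--             has_pixel = True
--
--         if has_feature and has_layer and has_pixel: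
--             return True
--
--     return False
-- ===== SOURCE B (Python) =====
-- def check_args(args):
--     """
--     Checks the command line arguments to ensure there's at least one feature, layer and pixel type.
--     :param args: The parsed command line args
--     :return: True if the args are fine, False if not.
--     """
--     return (any(k.startswith('-f') for k in args)
--             and any(k.startswith('-l') for k in args)
--             and any(k.startswith('-t') for k in args))
-- ===== Notes on version B (the rewrite author's own statement) =====
-- stated objective: idiomatic
-- what changed: A's single fused loop maintaining three mutable flags with an early return is replaced by three independent short-circuited any(...) existence scans combined with and (generator-based any beats per-element flag bookkeeping).
import Mathlib
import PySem

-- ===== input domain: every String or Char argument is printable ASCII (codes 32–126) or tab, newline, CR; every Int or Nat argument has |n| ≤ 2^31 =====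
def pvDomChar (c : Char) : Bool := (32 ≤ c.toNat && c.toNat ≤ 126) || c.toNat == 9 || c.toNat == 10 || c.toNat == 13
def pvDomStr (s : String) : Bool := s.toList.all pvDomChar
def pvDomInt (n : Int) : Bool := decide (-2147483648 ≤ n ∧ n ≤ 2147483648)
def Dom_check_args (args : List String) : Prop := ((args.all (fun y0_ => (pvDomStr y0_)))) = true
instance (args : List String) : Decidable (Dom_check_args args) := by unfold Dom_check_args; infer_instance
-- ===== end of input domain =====

-- B replaces A's fused flag-tracking loop with three independent short-circuited existence scans (idiomatic).

-- ===== PORT A =====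
-- literal port of A's for-loop: three flags threaded through the list, early return when all are set
def check_args_loop : List String → Bool → Bool → Bool → Bool
  | [], _, _, _ => false
  | k :: rest, has_feature, has_layer, has_pixel =>
    let has_layer := if PySem.Str.startswith k "-f" then true else has_layer
    let has_feature := if PySem.Str.startswith k "-l" then true else has_feature
    let has_pixel := if PySem.Str.startswith k "-t" then true else has_pixel
    if has_feature && has_layer && has_pixel then true
    else check_args_loop rest has_feature has_layer has_pixel

def check_args (args : List String) : Bool :=
  check_args_loop args false false false

-- ===== PORT B =====
def check_args_alt (args : List String) : Bool :=
  (args.any (fun k => PySem.Str.startswith k "-f"))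
    && (args.any (fun k => PySem.Str.startswith k "-l"))
    && (args.any (fun k => PySem.Str.startswith k "-t"))

-- ===== PRECONDITION & SPEC =====
def Spec_check_args (args : List String) (out : Bool) : Prop := out = check_args_alt args
instance (args : List String) (out : Bool) : Decidable (Spec_check_args args out) := by unfold Spec_check_args; infer_instance

-- ===== CLAIM (what is proved, stated in full; the proofs are below) =====
def Claim_equal_check_args : Prop := ∀ (args : List String), Dom_check_args args → Spec_check_args args (check_args args)

-- ===== LEMMAS AND PROOFS =====
-- loop invariant: with not-all-set flags f l p, the loop returns "each flag already set or witnessed later"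
theorem check_args_loop_eq (args : List String) :
    ∀ (f l p : Bool), (f && l && p) = false →
      check_args_loop args f l p =
        ((f || args.any (fun k => PySem.Str.startswith k "-l"))
          && (l || args.any (fun k => PySem.Str.startswith k "-f"))
          && (p || args.any (fun k => PySem.Str.startswith k "-t"))) := by
  induction args with
  | nil => intro f l p h; simp [check_args_loop, h]
  | cons k rest ih =>
    intro f l p h
    simp only [check_args_loop, List.any_cons]
    by_cases hf : PySem.Str.startswith k "-f" = true <;>
      by_cases hl : PySem.Str.startswith k "-l" = true <;>
        by_cases hp : PySem.Str.startswith k "-t" = true <;>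
          cases f <;> cases l <;> cases p <;>
            simp_all [ih]

-- ===== VERDICT (by name: the statement is the Claim_ definition above) =====
theorem check_args_spec : Claim_equal_check_args := by
  intro args _
  unfold Spec_check_args check_args check_args_alt
  rw [check_args_loop_eq args false false false rfl]
  simp [Bool.and_comm]
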